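-- pv_equiv track=rewrite | github.com/azaj01/Local-Cocoa | services/local_rag_agent/chunker.py | _find_table_ranges
-- ===== SOURCE A (Python) =====
-- from typing import Iterable, List, Optional, Tuple
--
-- def _find_table_ranges(text: str) -> List[Tuple[int, int]]:
--     """
--     Find markdown table ranges in text.
--     Tables start with a row containing | and continue until non-table lines.
--     """
--     ranges: List[Tuple[int, int]] = []
--     lines = text.split('\n')
--
--     in_table = False
--     table_start = 0
--     current_pos = 0
--
--     for i, line in enumerate(lines):
--         line_stripped = line.strip()
--         is_table_row = line_stripped.startswith('|') and '|' in line_stripped[1:]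
--         is_separator = '---' in line_stripped and '|' in line_stripped
--
--         if is_table_row or (in_table and is_separator):
--             if not in_table:
--                 table_start = current_pos
--                 in_table = True
--         else:
--             if in_table:
--                 # End of table
--                 ranges.append((table_start, current_pos))
--                 in_table = False
--
--         current_pos += len(line) + 1  # +1 for newline
--
--     # Handle table at end of text
--     if in_table:
--         ranges.append((table_start, len(text)))
--
--     return ranges
-- ===== SOURCE B (Python) =====
-- from itertools import accumulate
-- from typing import List, Tuple
--
-- def _find_table_ranges(text: str) -> List[Tuple[int, int]]:
--     """Nested-scan run extraction: an outer loop seeks the next table-start row,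
--     an inner loop consumes the whole table, over precomputed offsets."""
--     lines = text.split('\n')
--     n = len(lines)
--     offsets = [0] + list(accumulate(len(l) + 1 for l in lines))
--     stripped = [l.strip() for l in lines]
--
--     def is_row(s: str) -> bool:
--         return s.startswith('|') and '|' in s[1:]
--
--     def is_sep(s: str) -> bool:
--         return '---' in s and '|' in s
--
--     ranges: List[Tuple[int, int]] = []
--     i = 0
--     while i < n:
--         if is_row(stripped[i]):
--             start = offsets[i]
--             j = i + 1
--             while j < n and (is_row(stripped[j]) or is_sep(stripped[j])):
--                 j += 1
--             ranges.append((start, offsets[j] if j < n else len(text)))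
--             i = j
--         else:
--             i += 1
--     return ranges
-- ===== Notes on version B (the rewrite author's own statement) =====
-- stated objective: alternative
-- what changed: A's single stateful line-by-line state machine (in_table/table_start/current_pos mutated in one loop) is replaced by nested-scan run extraction: offsets and stripped lines are precomputed, then an outer while loop seeks the next table-start row and an inner while loop consumes the whole table before emitting its range.
import Mathlib
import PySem

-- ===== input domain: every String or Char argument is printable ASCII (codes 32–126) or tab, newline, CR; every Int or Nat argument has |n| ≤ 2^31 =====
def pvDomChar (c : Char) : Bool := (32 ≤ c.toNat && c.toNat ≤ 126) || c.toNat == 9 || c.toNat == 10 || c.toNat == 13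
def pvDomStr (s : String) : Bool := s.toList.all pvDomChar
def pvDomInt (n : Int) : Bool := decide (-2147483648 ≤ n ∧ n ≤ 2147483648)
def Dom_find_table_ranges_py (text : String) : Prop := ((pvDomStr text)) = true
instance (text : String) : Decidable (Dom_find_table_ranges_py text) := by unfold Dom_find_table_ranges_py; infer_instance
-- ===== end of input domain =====

-- B replaces A's single-pass line state machine by nested-scan run extraction over
-- precomputed offsets (outer loop seeks the next table-start row, inner loop consumes
-- the table); objective: alternative decomposition, same return value.


-- ===== PORT A =====
-- line_stripped.startswith('|') and '|' in line_stripped[1:]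
def ftrIsRow (line : List Char) : Bool :=
  let s := PySem.Chars.strip line
  PySem.Chars.startswith s ['|'] && PySem.Chars.isIn ['|'] (PySem.List.slice s (some 1) none)

-- '---' in line_stripped and '|' in line_stripped
def ftrIsSep (line : List Char) : Bool :=
  let s := PySem.Chars.strip line
  PySem.Chars.isIn ['-','-','-'] s && PySem.Chars.isIn ['|'] s

-- loop body of A; state = (ranges, in_table, table_start, current_pos)
def ftrStepA (st : List (Int × Int) × Bool × Int × Int) (line : List Char) :
    List (Int × Int) × Bool × Int × Int :=
  match st with
  | (ranges, in_table, table_start, pos) =>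
    if ftrIsRow line || (in_table && ftrIsSep line) then
      if !in_table then (ranges, true, pos, pos + (line.length : Int) + 1)
      else (ranges, true, table_start, pos + (line.length : Int) + 1)
    else
      if in_table then (ranges ++ [(table_start, pos)], false, table_start, pos + (line.length : Int) + 1)
      else (ranges, false, table_start, pos + (line.length : Int) + 1)

def find_table_ranges_py (text : String) : List (Int × Int) :=
  let lines := PySem.Chars.splitOn text.toList ['\n']
  match lines.foldl ftrStepA ([], false, 0, 0) with
  | (ranges, in_table, table_start, _) =>
    if in_table then ranges ++ [(table_start, PySem.Str.len text)] else ranges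

-- ===== PORT B =====
-- predicates on ALREADY-STRIPPED lines (Source B strips once, up front)
def ftrIsRowS (s : List Char) : Bool :=
  PySem.Chars.startswith s ['|'] && PySem.Chars.isIn ['|'] (PySem.List.slice s (some 1) none)

def ftrIsSepS (s : List Char) : Bool :=
  PySem.Chars.isIn ['-','-','-'] s && PySem.Chars.isIn ['|'] s

-- offsets = [0] + accumulate(len(l)+1): start offset of each line, plus one sentinel
def ftrOffsB (pos : Int) : List (List Char) → List Int
  | [] => [pos]
  | l :: ls => pos :: ftrOffsB (pos + (l.length : Int) + 1) ls

-- inner while loop: consume table lines from index j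
def ftrConsume (s : List (List Char)) (j : Nat) : Nat :=
  if j < s.length then
    if ftrIsRowS (s.getD j []) || ftrIsSepS (s.getD j []) then ftrConsume s (j + 1) else j
  else j
termination_by s.length - j

-- needed by ftrOuter's termination proof
theorem ftrConsume_le (s : List (List Char)) (j : Nat) : j ≤ ftrConsume s j := by
  fun_induction ftrConsume s j with
  | case1 j h hp ih => omega
  | case2 j h hp => exact Nat.le_refl j
  | case3 j h => exact Nat.le_refl j

-- outer while loop: seek the next table-start row, emit the run's range
def ftrOuter (s : List (List Char)) (offs : List Int) (tlen : Int) (i : Nat) :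
    List (Int × Int) :=
  if h : i < s.length then
    if ftrIsRowS (s.getD i []) then
      let j := ftrConsume s (i + 1)
      (offs.getD i 0, if j < s.length then offs.getD j 0 else tlen) :: ftrOuter s offs tlen j
    else ftrOuter s offs tlen (i + 1)
  else []
termination_by s.length - i
decreasing_by
  · have := ftrConsume_le s (i + 1); omega
  · omega

def find_table_ranges_py_alt (text : String) : List (Int × Int) :=
  let lines := PySem.Chars.splitOn text.toList ['\n']
  let offsets := ftrOffsB 0 lines
  let stripped := lines.map PySem.Chars.strip
  ftrOuter stripped offsets (PySem.Str.len text) 0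

-- ===== PRECONDITION & SPEC =====
def Spec_find_table_ranges_py (text : String) (out : List (Int × Int)) : Prop := out = find_table_ranges_py_alt text
instance (text : String) (out : List (Int × Int)) : Decidable (Spec_find_table_ranges_py text out) := by unfold Spec_find_table_ranges_py; infer_instance

-- ===== CLAIM (what is proved, stated in full; the proofs are below) =====
def Claim_equal_find_table_ranges_py : Prop := ∀ (text : String), Dom_find_table_ranges_py text → Spec_find_table_ranges_py text (find_table_ranges_py text)

-- ===== LEMMAS AND PROOFS =====

-- A's final fix-up: close the still-open table at end of text
def ftrFinish (tlen : Int) (st : List (Int × Int) × Bool × Int × Int) : List (Int × Int) :=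
  if st.2.1 then st.1 ++ [(st.2.2.1, tlen)] else st.1

lemma ftrIsRow_eq (l : List Char) : ftrIsRow l = ftrIsRowS (PySem.Chars.strip l) := rfl
lemma ftrIsSep_eq (l : List Char) : ftrIsSep l = ftrIsSepS (PySem.Chars.strip l) := rfl

lemma ftrOffsB_getD_zero (p : Int) (ls : List (List Char)) :
    (ftrOffsB p ls).getD 0 0 = p := by cases ls <;> simp [ftrOffsB]

lemma ftrOffsB_getD_succ (ls : List (List Char)) :
    ∀ (p : Int) (i : Nat), i < ls.length →
      (ftrOffsB p ls).getD (i + 1) 0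
        = (ftrOffsB p ls).getD i 0 + ((ls.getD i []).length : Int) + 1 := by
  induction ls with
  | nil => intro p i h; simp at h
  | cons l t ih =>
    intro p i h
    cases i with
    | zero =>
      simp only [ftrOffsB, List.getD_cons_succ, List.getD_cons_zero, ftrOffsB_getD_zero]
    | succ k =>
      simp only [ftrOffsB, List.getD_cons_succ]
      exact ih _ k (by simpa using h)

-- main loop correspondence: A's fold over the remaining lines (outside / inside a table)
-- versus B's outer/inner scans from index i
lemma ftr_main (lines : List (List Char)) (tlen : Int) :
    ∀ (k i : Nat), lines.length - i = k → i ≤ lines.length →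
      (∀ (ranges : List (Int × Int)) (ts pos : Int),
         (ftrOffsB 0 lines).getD i 0 = pos →
         ftrFinish tlen ((lines.drop i).foldl ftrStepA (ranges, false, ts, pos))
           = ranges ++ ftrOuter (lines.map PySem.Chars.strip) (ftrOffsB 0 lines) tlen i)
    ∧ (∀ (ranges : List (Int × Int)) (ts pos : Int),
         (ftrOffsB 0 lines).getD i 0 = pos →
         ftrFinish tlen ((lines.drop i).foldl ftrStepA (ranges, true, ts, pos))
           = ranges ++ (ts,
               if ftrConsume (lines.map PySem.Chars.strip) i < lines.length
               then (ftrOffsB 0 lines).getD (ftrConsume (lines.map PySem.Chars.strip) i) 0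
               else tlen)
             :: ftrOuter (lines.map PySem.Chars.strip) (ftrOffsB 0 lines) tlen
                  (ftrConsume (lines.map PySem.Chars.strip) i)) := by
  intro k
  induction k with
  | zero =>
    intro i hk hi
    have hin : i = lines.length := by omega
    subst hin
    constructor
    · intro ranges ts pos hpos
      rw [List.drop_length]
      rw [ftrOuter]
      simp [ftrFinish]
    · intro ranges ts pos hpos
      rw [List.drop_length]
      have hc : ftrConsume (lines.map PySem.Chars.strip) lines.length = lines.length := by
        rw [ftrConsume, if_neg (by simp)]
      rw [hc, ftrOuter]
      simp [ftrFinish]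
  | succ k ih =>
    intro i hk hi
    have hlt : i < lines.length := by omega
    have hdrop : lines.drop i = lines[i] :: lines.drop (i + 1) :=
      (List.getElem_cons_drop hlt).symm
    have hsg : (lines.map PySem.Chars.strip).getD i [] = PySem.Chars.strip lines[i] := by
      have hm : i < (lines.map PySem.Chars.strip).length := by simpa using hlt
      rw [List.getD_eq_getElem _ _ hm, List.getElem_map]
    have hsl : (lines.map PySem.Chars.strip).length = lines.length := by simp
    have hoffs : ∀ pos : Int, (ftrOffsB 0 lines).getD i 0 = pos →
        (ftrOffsB 0 lines).getD (i + 1) 0 = pos + ((lines[i]).length : Int) + 1 := by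
      intro pos hpos
      rw [ftrOffsB_getD_succ lines 0 i hlt, hpos]
      congr 2
      rw [List.getD_eq_getElem _ _ hlt]
    obtain ⟨ihO, ihI⟩ := ih (i + 1) (by omega) (by omega)
    constructor
    · -- outside a table at line i
      intro ranges ts pos hpos
      rw [hdrop, List.foldl_cons]
      rw [ftrOuter]
      simp only [hsl, hlt, dif_pos, hsg]
      by_cases hrow : ftrIsRowS (PySem.Chars.strip lines[i]) = true
      · -- line i starts a table
        have hstep : ftrStepA (ranges, false, ts, pos) lines[i]
            = (ranges, true, pos, pos + ((lines[i]).length : Int) + 1) := by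
          simp only [ftrStepA, ftrIsRow_eq, hrow]
          simp
        rw [hstep, if_pos hrow]
        have := ihI ranges pos (pos + ((lines[i]).length : Int) + 1) (hoffs pos hpos)
        rw [this, hpos]
      · -- line i is not a table row
        have hstep : ftrStepA (ranges, false, ts, pos) lines[i]
            = (ranges, false, ts, pos + ((lines[i]).length : Int) + 1) := by
          simp only [ftrStepA, ftrIsRow_eq, hrow]
          simp
        rw [hstep, if_neg hrow]
        exact ihO ranges ts (pos + ((lines[i]).length : Int) + 1) (hoffs pos hpos)
    · -- inside a table at line i
      intro ranges ts pos hpos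
      rw [hdrop, List.foldl_cons]
      have hcu : ftrConsume (lines.map PySem.Chars.strip) i
          = if (ftrIsRowS (PySem.Chars.strip lines[i])
                || ftrIsSepS (PySem.Chars.strip lines[i])) = true
            then ftrConsume (lines.map PySem.Chars.strip) (i + 1) else i := by
        rw [ftrConsume]
        simp [hsl, hlt]
      by_cases hcont : (ftrIsRowS (PySem.Chars.strip lines[i])
            || ftrIsSepS (PySem.Chars.strip lines[i])) = true
      · -- line i continues the table
        have hstep : ftrStepA (ranges, true, ts, pos) lines[i]
            = (ranges, true, ts, pos + ((lines[i]).length : Int) + 1) := by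
          simp only [ftrStepA, ftrIsRow_eq, ftrIsSep_eq]
          rw [Bool.true_and, hcont]
          simp
        rw [hstep, hcu, if_pos hcont]
        exact ihI ranges ts (pos + ((lines[i]).length : Int) + 1) (hoffs pos hpos)
      · -- line i ends the table: A emits (ts, pos) and goes outside
        have hstep : ftrStepA (ranges, true, ts, pos) lines[i]
            = (ranges ++ [(ts, pos)], false, ts, pos + ((lines[i]).length : Int) + 1) := by
          simp only [ftrStepA, ftrIsRow_eq, ftrIsSep_eq]
          rw [Bool.true_and, if_neg hcont]
          simp
        have hrow : ftrIsRowS (PySem.Chars.strip lines[i]) = false := by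
          cases h : ftrIsRowS (PySem.Chars.strip lines[i]) <;> simp_all
        have houter : ftrOuter (lines.map PySem.Chars.strip) (ftrOffsB 0 lines) tlen i
            = ftrOuter (lines.map PySem.Chars.strip) (ftrOffsB 0 lines) tlen (i + 1) := by
          rw [ftrOuter]
          simp [hsl, hlt, hrow]
        rw [hstep, hcu, if_neg hcont, if_pos hlt, hpos, houter]
        have := ihO (ranges ++ [(ts, pos)]) ts (pos + ((lines[i]).length : Int) + 1)
          (hoffs pos hpos)
        rw [this]
        simp

-- ===== VERDICT (by name: the statement is the Claim_ definition above) =====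
theorem find_table_ranges_py_spec : Claim_equal_find_table_ranges_py := by
  intro text _
  show find_table_ranges_py text = find_table_ranges_py_alt text
  obtain ⟨hO, -⟩ := ftr_main (PySem.Chars.splitOn text.toList ['\n']) (PySem.Str.len text)
    ((PySem.Chars.splitOn text.toList ['\n']).length - 0) 0 rfl (Nat.zero_le _)
  have h0 := hO [] 0 0 (ftrOffsB_getD_zero 0 _)
  rw [List.drop_zero] at h0
  simp only [List.nil_append] at h0
  simp only [find_table_ranges_py, find_table_ranges_py_alt]
  rw [← h0]
  generalize (PySem.Chars.splitOn text.toList ['\n']).foldl ftrStepA ([], false, 0, 0) = st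
  rcases st with ⟨ra, ba, tsa, pa⟩
  cases ba <;> simp [ftrFinish]
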